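-- pv_equiv track=rewrite | github.com/Demindiro/GeneSYS | scripts/debug.py | crc32c
-- ===== SOURCE A (Python) =====
-- def crc32c(data):
--     POLY = 0x82f63b78
--     x = 0xffff_ffff
--     for b in data:
--         x ^= b
--         for _ in range(8):
--             x = (x >> 1) ^ (-(x & 1) & POLY)
--     return x ^ 0xffff_ffff
-- ===== SOURCE B (Python) =====
-- # Table-driven CRC32C: precompute a 256-entry lookup table once, then one table
-- # lookup per input byte instead of A's 8 bit-iterations per byte.
--
-- _POLY = 0x82f63b78
--
--
-- def _crc_byte(c):
--     for _ in range(8):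
--         c = (c >> 1) ^ (-(c & 1) & _POLY)
--     return c
--
--
-- _CRC_TABLE = [_crc_byte(l) for l in range(256)]
--
--
-- def crc32c(data):
--     x = 0xffff_ffff
--     for b in data:
--         y = x ^ b
--         x = (y >> 8) ^ _CRC_TABLE[y & 0xff]
--     return x ^ 0xffff_ffff
-- ===== Notes on version B (the rewrite author's own statement) =====
-- stated objective: faster
-- what changed: Replaces the 8-iteration-per-byte bit loop with a 256-entry CRC table precomputed once at import, so each input element costs one shift, one mask and one table lookup.
import Mathlib
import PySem

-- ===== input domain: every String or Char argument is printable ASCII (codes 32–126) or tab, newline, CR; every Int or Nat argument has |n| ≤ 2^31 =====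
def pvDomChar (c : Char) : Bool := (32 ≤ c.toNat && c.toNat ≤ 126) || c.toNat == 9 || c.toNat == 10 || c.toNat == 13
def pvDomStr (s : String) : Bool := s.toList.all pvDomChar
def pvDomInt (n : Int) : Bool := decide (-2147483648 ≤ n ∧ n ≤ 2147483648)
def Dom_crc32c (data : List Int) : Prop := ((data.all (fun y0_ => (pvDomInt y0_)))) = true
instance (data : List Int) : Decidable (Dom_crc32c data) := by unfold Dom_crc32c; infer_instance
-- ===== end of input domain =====

-- B replaces A's 8-iterations-per-byte bit loop by a precomputed 256-entry lookup table (one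
-- table lookup per byte); same return value for every list of Python ints.

-- ===== PORT A =====
def crc32c (data : List Int) : Int :=
  -- x = 0xffffffff; for b in data: x ^= b; 8 × (x = (x >> 1) ^ (-(x & 1) & POLY)); return x ^ 0xffffffff
  PySem.Int.bxor
    (data.foldl (fun x b =>
      (List.range 8).foldl
        (fun c _ => PySem.Int.bxor (c >>> (1:Nat)) (PySem.Int.band (-(PySem.Int.band c 1)) 2197175160))
        (PySem.Int.bxor x b)) 4294967295)
    4294967295

-- ===== PORT B =====
-- helper _crc_byte of Source B: run the 8 bit-steps on one value (used only to build the table)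
def pvCrcByte (c : Int) : Int :=
  (List.range 8).foldl
    (fun c _ => PySem.Int.bxor (c >>> (1:Nat)) (PySem.Int.band (-(PySem.Int.band c 1)) 2197175160)) c

-- _CRC_TABLE of Source B: the 256-entry lookup table
def pvCrcTable : List Int := (List.range 256).map (fun l => pvCrcByte (Int.ofNat l))

def crc32c_alt (data : List Int) : Int :=
  -- x = 0xffffffff; for b in data: y = x ^ b; x = (y >> 8) ^ _CRC_TABLE[y & 0xff]; return x ^ 0xffffffff
  -- the index y & 0xff always lies in [0, 256), so Python's in-range list indexing is List.getD here
  PySem.Int.bxor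
    (data.foldl (fun x b =>
        let y := PySem.Int.bxor x b
        PySem.Int.bxor (y >>> (8:Nat)) (pvCrcTable.getD (PySem.Int.band y 255).toNat 0)) 4294967295)
    4294967295

-- ===== PRECONDITION & SPEC =====
def Spec_crc32c (data : List Int) (out : Int) : Prop := out = crc32c_alt data
instance (data : List Int) (out : Int) : Decidable (Spec_crc32c data out) := by unfold Spec_crc32c; infer_instance

-- ===== CLAIM (what is proved, stated in full; the proofs are below) =====
def Claim_equal_crc32c : Prop := ∀ (data : List Int), Dom_crc32c data → Spec_crc32c data (crc32c data)

-- ===== LEMMAS AND PROOFS =====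

def pvTb : Int → Nat → Bool
  | .ofNat n, k => n.testBit k
  | .negSucc n, k => !(n.testBit k)

theorem pvNegSub (n : Nat) : (-(n:Int) - 1) = Int.negSucc n := by
  simp [Int.negSucc_eq]; ring


theorem pvTb_ext {a b : Int} (h : ∀ k, pvTb a k = pvTb b k) : a = b := by
  cases a with
  | ofNat m => cases b with
    | ofNat n => exact congrArg Int.ofNat (Nat.eq_of_testBit_eq (fun k => h k))
    | negSucc n =>
      exfalso
      have h1 := h (m + n + 1)
      simp [pvTb] at h1
      rw [Nat.testBit_lt_two_pow (lt_of_lt_of_le (Nat.lt_two_pow_self) (Nat.pow_le_pow_right (by omega) (by omega))),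
          Nat.testBit_lt_two_pow (lt_of_lt_of_le (Nat.lt_two_pow_self) (Nat.pow_le_pow_right (by omega) (by omega)))] at h1
      simp at h1
  | negSucc m => cases b with
    | ofNat n =>
      exfalso
      have h1 := h (m + n + 1)
      simp [pvTb] at h1
      rw [Nat.testBit_lt_two_pow (lt_of_lt_of_le (Nat.lt_two_pow_self) (Nat.pow_le_pow_right (by omega) (by omega))),
          Nat.testBit_lt_two_pow (lt_of_lt_of_le (Nat.lt_two_pow_self) (Nat.pow_le_pow_right (by omega) (by omega)))] at h1
      simp at h1
    | negSucc n =>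
      have : m = n := Nat.eq_of_testBit_eq (fun k => by have := h k; simpa [pvTb] using this)
      rw [this]

theorem pvTb_bxor (a b : Int) (k : Nat) :
    pvTb (PySem.Int.bxor a b) k = xor (pvTb a k) (pvTb b k) := by
  cases a with
  | ofNat m => cases b with
    | ofNat n => simp [PySem.Int.bxor, pvTb, Nat.testBit_xor]
    | negSucc n =>
      have h0 : ¬ (0:Int) ≤ .negSucc n := by omega
      simp [PySem.Int.bxor, h0]
      rw [pvNegSub]
      simp [pvTb, Nat.testBit_xor]
  | negSucc m => cases b with
    | ofNat n =>
      have h0 : ¬ (0:Int) ≤ .negSucc m := by omega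
      simp [PySem.Int.bxor, h0]
      rw [pvNegSub]
      simp [pvTb, Nat.testBit_xor]
    | negSucc n =>
      have h0 : ¬ (0:Int) ≤ .negSucc m := by omega
      have h1 : ¬ (0:Int) ≤ .negSucc n := by omega
      simp [PySem.Int.bxor, h0, h1]
      simp [pvTb, Nat.testBit_xor]

theorem pvTb_shr (x : Int) (s k : Nat) : pvTb (x >>> s) k = pvTb x (k + s) := by
  cases x with
  | ofNat n =>
    show pvTb (Int.ofNat (n >>> s)) k = _
    simp [pvTb, Nat.testBit_shiftRight, Nat.add_comm]
  | negSucc n =>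
    show pvTb (Int.negSucc (n >>> s)) k = _
    simp [pvTb, Nat.testBit_shiftRight, Nat.add_comm]

set_option maxRecDepth 4000 in
theorem pvSub255 : ∀ m, m < 256 → 255 - m = 255 ^^^ m := by decide

theorem pvTb_band255 (x : Int) (k : Nat) :
    pvTb (PySem.Int.band x 255) k = (pvTb x k && decide (k < 8)) := by
  have h255 : ∀ j, Nat.testBit 255 j = decide (j < 8) := by
    intro j; have := Nat.testBit_two_pow_sub_one 8 j; norm_num at this; exact this
  cases x with
  | ofNat m =>
    simp [PySem.Int.band, pvTb, Nat.testBit_and, h255]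
  | negSucc m =>
    have h0 : ¬ (0:Int) ≤ .negSucc m := by omega
    simp [PySem.Int.band, h0]
    rw [pvSub255 _ (by have := Nat.and_le_left (n := 255) (m := m); omega)]
    simp [pvTb, Nat.testBit_xor, Nat.testBit_and, h255]
    cases m.testBit k <;> by_cases hk : k < 8 <;> simp [hk]

theorem pvBand_one (x : Int) : PySem.Int.band x 1 = cond (pvTb x 0) 1 0 := by
  cases x with
  | ofNat m =>
    simp [PySem.Int.band, pvTb, Nat.testBit_zero, Nat.and_one_is_mod]
    rcases Nat.mod_two_eq_zero_or_one m with h | h <;> simp [h] <;> omega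
  | negSucc m =>
    have h0 : ¬ (0:Int) ≤ .negSucc m := by omega
    simp [PySem.Int.band, h0, pvTb, Nat.testBit_zero]
    rcases Nat.mod_two_eq_zero_or_one m with h | h <;> simp [h]

def pvStep (c : Int) : Int :=
  PySem.Int.bxor (c >>> (1:Nat)) (PySem.Int.band (-(PySem.Int.band c 1)) 2197175160)

theorem pvStep_eq (x : Int) :
    pvStep x = PySem.Int.bxor (x >>> (1:Nat)) (cond (pvTb x 0) 2197175160 0) := by
  unfold pvStep
  rw [pvBand_one]
  cases h : pvTb x 0
  · show PySem.Int.bxor (x >>> (1:Nat)) (PySem.Int.band (-0) 2197175160) = _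
    rw [show PySem.Int.band (-0) 2197175160 = 0 by decide]
    simp
  · show PySem.Int.bxor (x >>> (1:Nat)) (PySem.Int.band (-1) 2197175160) = _
    rw [show PySem.Int.band (-1) 2197175160 = 2197175160 by decide]
    rfl

theorem pvTb_zero (k : Nat) : pvTb 0 k = false := by
  show pvTb (Int.ofNat 0) k = false
  simp [pvTb]

def pvIter : Nat → Int → Int
  | 0, y => y
  | n+1, y => pvIter n (pvStep y)

theorem pvIter_succ' (n : Nat) (y : Int) : pvIter (n+1) y = pvStep (pvIter n y) := by
  induction n generalizing y with
  | zero => rfl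
  | succ m ih => show pvIter (m+1) (pvStep y) = _; rw [ih]; rfl

theorem pvFoldl_range (n : Nat) (z : Int) :
    (List.range n).foldl (fun c _ => pvStep c) z = pvIter n z := by
  induction n with
  | zero => rfl
  | succ m ih => rw [List.range_succ, List.foldl_append, ih, pvIter_succ']; rfl

theorem pvStep_lin (a b : Int) :
    pvStep (PySem.Int.bxor a b) = PySem.Int.bxor (pvStep a) (pvStep b) := by
  apply pvTb_ext; intro k
  simp only [pvStep_eq, pvTb_bxor, pvTb_shr]
  cases ha : pvTb a 0 <;> cases hb : pvTb b 0 <;>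
    simp [pvTb_zero] <;>
    cases pvTb a (k+1) <;> cases pvTb b (k+1) <;>
    cases pvTb 2197175160 k <;> rfl

theorem pvIter_lin (n : Nat) (a b : Int) :
    pvIter n (PySem.Int.bxor a b) = PySem.Int.bxor (pvIter n a) (pvIter n b) := by
  induction n generalizing a b with
  | zero => rfl
  | succ m ih => show pvIter m (pvStep _) = _; rw [pvStep_lin, ih]; rfl

theorem pvShrShr (x : Int) (a b : Nat) : (x >>> a) >>> b = x >>> (a + b) := by
  cases x with
  | ofNat n =>
    show Int.ofNat ((n >>> a) >>> b) = Int.ofNat (n >>> (a+b))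
    rw [Nat.shiftRight_add]
  | negSucc n =>
    show Int.negSucc ((n >>> a) >>> b) = Int.negSucc (n >>> (a+b))
    rw [Nat.shiftRight_add]

theorem pvShrZero (x : Int) : x >>> (0:Nat) = x := by
  cases x with
  | ofNat n => show Int.ofNat (n >>> 0) = _; rw [Nat.shiftRight_zero]
  | negSucc n => show Int.negSucc (n >>> 0) = _; rw [Nat.shiftRight_zero]

theorem pvIter_low (n : Nat) (y : Int) (h : ∀ k, k < n → pvTb y k = false) :
    pvIter n y = y >>> n := by
  induction n generalizing y with
  | zero => rw [pvShrZero]; rfl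
  | succ m ih =>
    show pvIter m (pvStep y) = _
    have hs : pvStep y = y >>> (1:Nat) := by
      rw [pvStep_eq, h 0 (by omega)]; simp
    rw [hs, ih _ (fun k hk => by rw [pvTb_shr]; exact h (k+1) (by omega)), pvShrShr]
    norm_num [Nat.add_comm]

theorem pvDecomp (y : Int) :
    pvIter 8 y = PySem.Int.bxor (y >>> (8:Nat)) (pvIter 8 (PySem.Int.band y 255)) := by
  have h1 : PySem.Int.bxor (PySem.Int.bxor y (PySem.Int.band y 255)) (PySem.Int.band y 255) = y := by
    apply pvTb_ext; intro k
    simp [pvTb_bxor]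
  have h2 : ∀ k, k < 8 → pvTb (PySem.Int.bxor y (PySem.Int.band y 255)) k = false := by
    intro k hk
    simp [pvTb_bxor, pvTb_band255, hk]
  have h3 : (PySem.Int.bxor y (PySem.Int.band y 255)) >>> (8:Nat) = y >>> (8:Nat) := by
    apply pvTb_ext; intro k
    rw [pvTb_shr, pvTb_shr, pvTb_bxor, pvTb_band255]
    simp
  calc pvIter 8 y = pvIter 8 (PySem.Int.bxor (PySem.Int.bxor y (PySem.Int.band y 255)) (PySem.Int.band y 255)) := by rw [h1]
    _ = PySem.Int.bxor (pvIter 8 (PySem.Int.bxor y (PySem.Int.band y 255))) (pvIter 8 (PySem.Int.band y 255)) := pvIter_lin _ _ _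
    _ = PySem.Int.bxor (y >>> (8:Nat)) (pvIter 8 (PySem.Int.band y 255)) := by rw [pvIter_low 8 _ h2, h3]

theorem pvBand255_bounds (y : Int) : 0 ≤ PySem.Int.band y 255 ∧ PySem.Int.band y 255 < 256 := by
  cases y with
  | ofNat m =>
    have : m &&& 255 ≤ 255 := Nat.and_le_right
    simp [PySem.Int.band]
    omega
  | negSucc m =>
    have h0 : ¬ (0:Int) ≤ .negSucc m := by omega
    simp [PySem.Int.band, h0]
    omega

theorem pvTable_getD (i : Nat) (hi : i < 256) :
    pvCrcTable.getD i 0 = pvIter 8 (Int.ofNat i) := by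
  unfold pvCrcTable
  rw [List.getD_eq_getElem?_getD]
  simp [hi]
  show pvCrcByte _ = _
  unfold pvCrcByte
  rw [show (fun (c : Int) (_ : Nat) => PySem.Int.bxor (c >>> (1:Nat)) (PySem.Int.band (-(PySem.Int.band c 1)) 2197175160)) = (fun c _ => pvStep c) from rfl]
  exact pvFoldl_range 8 _

theorem pvByte_eq (x b : Int) :
    (List.range 8).foldl
        (fun c _ => PySem.Int.bxor (c >>> (1:Nat)) (PySem.Int.band (-(PySem.Int.band c 1)) 2197175160))
        (PySem.Int.bxor x b)
      = (let y := PySem.Int.bxor x b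
         PySem.Int.bxor (y >>> (8:Nat)) (pvCrcTable.getD (PySem.Int.band y 255).toNat 0)) := by
  rw [show (fun (c : Int) (_ : Nat) => PySem.Int.bxor (c >>> (1:Nat)) (PySem.Int.band (-(PySem.Int.band c 1)) 2197175160)) = (fun c _ => pvStep c) from rfl]
  rw [pvFoldl_range]
  set y := PySem.Int.bxor x b with hy
  obtain ⟨hlo0, hlo256⟩ := pvBand255_bounds y
  have htn : (Int.ofNat (PySem.Int.band y 255).toNat) = PySem.Int.band y 255 := by
    simpa using Int.toNat_of_nonneg hlo0
  rw [pvDecomp y]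
  show _ = PySem.Int.bxor (y >>> (8:Nat)) (pvCrcTable.getD (PySem.Int.band y 255).toNat 0)
  rw [pvTable_getD _ (by omega), htn]

theorem pvFold_eq (data : List Int) (z : Int) :
    data.foldl (fun x b =>
      (List.range 8).foldl
        (fun c _ => PySem.Int.bxor (c >>> (1:Nat)) (PySem.Int.band (-(PySem.Int.band c 1)) 2197175160))
        (PySem.Int.bxor x b)) z
    = data.foldl (fun x b =>
        let y := PySem.Int.bxor x b
        PySem.Int.bxor (y >>> (8:Nat)) (pvCrcTable.getD (PySem.Int.band y 255).toNat 0)) z := by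
  induction data generalizing z with
  | nil => rfl
  | cons hd tl ih =>
    simp only [List.foldl_cons]
    rw [pvByte_eq]
    exact ih _

theorem crc32c_eq_alt (data : List Int) : crc32c data = crc32c_alt data := by
  unfold crc32c crc32c_alt
  rw [pvFold_eq]

-- ===== VERDICT (by name: the statement is the Claim_ definition above) =====
theorem crc32c_spec : Claim_equal_crc32c := by
  intro data _
  unfold Spec_crc32c
  exact crc32c_eq_alt data
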